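-- pv_equiv track=rewrite | github.com/David2837/mtg-friends-trades | app/main.py | parse_mana_cost
-- ===== SOURCE A (Python) =====
-- def parse_mana_cost(mana_cost: str | None) -> list[str]:
--     """
--     Turn "{1}{R}{R}" into ["1", "R", "R"].
--     Handles weirdness by just returning what's between {}.
--     """
--     if not mana_cost:
--         return []
--     result: list[str] = []
--     buf = ""
--     inside = False
--     for ch in mana_cost:
--         if ch == "{":
--             inside = True
--             buf = ""
--         elif ch == "}":
--             if inside and buf:
--                 result.append(buf)
--             inside = False
--             buf = ""
--         else:
--             if inside:
--                 buf += ch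
--     return result
-- ===== SOURCE B (Python) =====
-- def parse_mana_cost(mana_cost):
--     if not mana_cost:
--         return []
--     result = []
--     for piece in mana_cost.split("{")[1:]:
--         head, sep, _ = piece.partition("}")
--         if sep and head:
--             result.append(head)
--     return result
-- ===== Notes on version B (the rewrite author's own statement) =====
-- stated objective: idiomatic
-- what changed: Replaces A's character-by-character state machine (inside flag plus growing buffer) by splitting the string on the opening brace and partitioning each piece at the first closing brace, keeping the non-empty text before it.
import Mathlib
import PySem

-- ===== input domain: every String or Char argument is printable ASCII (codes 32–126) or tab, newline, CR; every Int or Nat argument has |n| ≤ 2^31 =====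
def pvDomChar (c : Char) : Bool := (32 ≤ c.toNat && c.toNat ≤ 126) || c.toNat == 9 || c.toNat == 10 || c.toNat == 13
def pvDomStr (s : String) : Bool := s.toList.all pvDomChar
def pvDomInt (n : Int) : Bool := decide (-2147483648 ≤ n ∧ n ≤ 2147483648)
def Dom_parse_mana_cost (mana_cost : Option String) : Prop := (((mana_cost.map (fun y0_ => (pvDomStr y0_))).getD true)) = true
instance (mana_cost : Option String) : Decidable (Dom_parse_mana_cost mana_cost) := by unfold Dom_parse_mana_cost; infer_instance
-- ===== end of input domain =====

-- B replaces A's character-by-character state machine with split("{") + partition("}")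
-- per piece (objective: simpler/more idiomatic); return values proved equal on all inputs.

-- ===== PORT A =====
-- A's loop body: state = (result, buf, inside); buf is kept as List Char, appended on the right.
def pvStep (st : List String × List Char × Bool) (ch : Char) : List String × List Char × Bool :=
  let (result, buf, inside) := st
  if ch = '{' then (result, [], true)
  else if ch = '}' then
    ((if inside ∧ buf ≠ [] then result ++ [String.ofList buf] else result), [], false)
  else
    (result, (if inside then buf ++ [ch] else buf), inside)

def parse_mana_cost (mana_cost : Option String) : List String :=
  match mana_cost with
  | none => []                       -- "if not mana_cost" (None)
  | some s =>
    if s = "" then []                -- "if not mana_cost" (empty string)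
    else (s.toList.foldl pvStep ([], [], false)).1

-- ===== PORT B =====
-- piece.partition("}") ported by hand, step for step: head = chars before the first '}'
-- (takeWhile), sep is non-empty iff '}' occurs in piece (contains); exact for 1-char sep.
def pvPiece (piece : List Char) : Option String :=
  let head := piece.takeWhile (fun c => c ≠ '}')
  if piece.contains '}' ∧ head ≠ [] then some (String.ofList head) else none

def parse_mana_cost_alt (mana_cost : Option String) : List String :=
  match mana_cost with
  | none => []                       -- "if not mana_cost" (None)
  | some s =>
    if s = "" then []                -- "if not mana_cost" (empty string)
    else
      -- mana_cost.split("{")[1:] ported as the corresponding Lean function List.splitOn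
      ((s.toList.splitOn '{').tail).filterMap pvPiece

-- ===== PRECONDITION & SPEC =====
def Spec_parse_mana_cost (mana_cost : Option String) (out : List String) : Prop := out = parse_mana_cost_alt mana_cost
instance (mana_cost : Option String) (out : List String) : Decidable (Spec_parse_mana_cost mana_cost out) := by unfold Spec_parse_mana_cost; infer_instance

-- ===== CLAIM (what is proved, stated in full; the proofs are below) =====
def Claim_equal_parse_mana_cost : Prop := ∀ (mana_cost : Option String), Dom_parse_mana_cost mana_cost → Spec_parse_mana_cost mana_cost (parse_mana_cost mana_cost)

-- ===== LEMMAS AND PROOFS =====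

-- what A's scan emits from the rest of the current piece when it is inside braces with buffer buf
def pvPickIn (buf piece : List Char) : Option String :=
  if piece.contains '}' ∧ buf ++ piece.takeWhile (fun c => c ≠ '}') ≠ [] then
    some (String.ofList (buf ++ piece.takeWhile (fun c => c ≠ '}'))) else none

lemma pvPickIn_nil (piece : List Char) : pvPickIn [] piece = pvPiece piece := by
  simp [pvPickIn, pvPiece]

lemma pv_tail_modifyHead {α : Type} (f : α → α) (l : List α) :
    (l.modifyHead f).tail = l.tail := by
  cases l <;> rfl

lemma pv_splitOn_cons_ne (c : Char) (cs : List Char) (h : c ≠ '{') :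
    (c :: cs).splitOn '{' = (cs.splitOn '{').modifyHead (c :: ·) := by
  simp [List.splitOn, List.splitOnP_cons, h]

lemma pv_splitOn_head (cs : List Char) :
    cs.splitOn '{' = cs.takeWhile (fun c => c ≠ '{') :: (cs.splitOn '{').tail := by
  induction cs with
  | nil => simp [List.splitOn, List.splitOnP_nil]
  | cons c cs ih =>
    by_cases h : c = '{'
    · subst h; simp [List.splitOn, List.splitOnP_cons]
    · rw [pv_splitOn_cons_ne c cs h]
      conv_lhs => rw [ih]
      rw [pv_tail_modifyHead, List.modifyHead_cons]
      simp [h]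

lemma pv_splitOn_brace (cs : List Char) :
    ('{' :: cs).splitOn '{' = [] :: cs.splitOn '{' := by
  simp [List.splitOn, List.splitOnP_cons]

lemma pv_splitOn_other (c : Char) (cs : List Char) (h : c ≠ '{') :
    ((c :: cs).splitOn '{') = (c :: cs.takeWhile (fun c => c ≠ '{')) :: (cs.splitOn '{').tail := by
  rw [pv_splitOn_cons_ne c cs h]
  conv_lhs => rw [pv_splitOn_head cs]
  rfl

-- the invariant of A's fold, by induction on the character list
lemma pv_scan (cs : List Char) : ∀ (res : List String) (buf : List Char) (inside : Bool),
    (cs.foldl pvStep (res, buf, inside)).1 =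
      res ++ (if inside then (pvPickIn buf (cs.takeWhile (fun c => c ≠ '{'))).toList else [])
          ++ ((cs.splitOn '{').tail).filterMap pvPiece := by
  induction cs with
  | nil =>
    intro res buf inside
    cases inside <;> simp [pvPickIn, List.splitOn, List.splitOnP_nil]
  | cons c cs ih =>
    intro res buf inside
    by_cases hob : c = '{'
    · subst hob
      have hst : pvStep (res, buf, inside) '{' = (res, [], true) := by
        cases inside <;> simp [pvStep]
      rw [List.foldl_cons, hst, ih, pv_splitOn_brace, List.tail_cons]
      conv_rhs => rw [pv_splitOn_head cs]
      have htw : List.takeWhile (fun c => decide (c ≠ '{')) ('{' :: cs) = [] := by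
        simp
      rw [htw]
      have hnone : pvPickIn buf ([] : List Char) = none := by simp [pvPickIn]
      cases inside <;>
        simp only [Bool.false_eq_true, if_false, if_true, hnone, Option.toList_none,
          List.append_nil, pvPickIn_nil] <;>
        cases hP : pvPiece (List.takeWhile (fun c => !decide (c = '{')) cs) <;>
        simp [hP]
    · by_cases hcb : c = '}'
      · subst hcb
        have hst : pvStep (res, buf, inside) '}' =
            ((if inside ∧ buf ≠ [] then res ++ [String.ofList buf] else res), [], false) := by
          simp [pvStep]
        rw [List.foldl_cons, hst, ih, pv_splitOn_other _ _ (by decide), List.tail_cons]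
        cases inside
        · simp
        · have htw : List.takeWhile (fun c => decide (c ≠ '{')) ('}' :: cs)
              = '}' :: cs.takeWhile (fun c => c ≠ '{') := by
            simp
          rw [htw]
          have hpk : pvPickIn buf ('}' :: cs.takeWhile (fun c => c ≠ '{'))
              = if buf ≠ [] then some (String.ofList buf) else none := by
            simp [pvPickIn]
          rw [hpk]
          split_ifs with h1 h2 h2 <;> simp_all
      · have hst : pvStep (res, buf, inside) c =
            (res, (if inside then buf ++ [c] else buf), inside) := by
          simp [pvStep, hob, hcb]
        rw [List.foldl_cons, hst, ih, pv_splitOn_other _ _ hob, List.tail_cons]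
        cases inside
        · simp
        · have htw : List.takeWhile (fun c => decide (c ≠ '{')) (c :: cs)
              = c :: cs.takeWhile (fun c => c ≠ '{') := by
            simp [hob]
          rw [htw]
          have hpk : pvPickIn buf (c :: cs.takeWhile (fun c => c ≠ '{'))
              = pvPickIn (buf ++ [c]) (cs.takeWhile (fun c => c ≠ '{')) := by
            have hcb' : ¬('}' = c) := fun h => hcb h.symm
            simp [pvPickIn, hcb, hcb', List.append_assoc]
          rw [hpk]
          simp

-- ===== VERDICT (by name: the statement is the Claim_ definition above) =====
theorem parse_mana_cost_spec : Claim_equal_parse_mana_cost := by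
  intro mana_cost _
  unfold Spec_parse_mana_cost parse_mana_cost parse_mana_cost_alt
  cases mana_cost with
  | none => rfl
  | some s =>
    by_cases h : s = ""
    · simp [h]
    · simp only [h, if_false]
      rw [pv_scan]
      simp
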